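-- pv_equiv track=rewrite | github.com/Schopenhauer-loves-Hegel/FlagGems | src/flag_gems/experimental/generated/pointwise/empty_permuted.py | _compute_permuted_strides
-- ===== SOURCE A (Python) =====
-- def _compute_permuted_strides(size, permutation):
--     # Compute strides such that the tensor is contiguous when iterating in `permutation` order.
--     dim = len(size)
--     assert len(permutation) == dim, "permutation must have the same number of dims as size"
--     stride = [0] * dim
--     curr = 1
--     for idx in range(dim - 1, -1, -1):
--         d = permutation[idx]
--         s = int(size[d])
--         if s == 0:
--             s = 1
--         stride[d] = curr
--         curr *= s
--     return tuple(stride)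
-- ===== SOURCE B (Python) =====
-- def _compute_permuted_strides(size, permutation):
--     # Structural recursion on the iteration order: the recursive call fills the
--     # strides for the tail and returns the number of elements the tail covers,
--     # which is exactly the stride of the current dimension.
--     dim = len(size)
--     assert len(permutation) == dim, "permutation must have the same number of dims as size"
--     stride = [0] * dim
--
--     def fill(order):
--         if not order:
--             return 1
--         d = order[0]
--         inner = fill(order[1:])
--         stride[d] = inner
--         s = int(size[d])
--         return inner * (s if s != 0 else 1)
--
--     fill(list(permutation))
--     return tuple(stride)
-- ===== Notes on version B (the rewrite author's own statement) =====
-- stated objective: alternative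
-- what changed: B computes the strides by structural recursion on the permutation list (each call fills the tail's strides first and returns the element count the tail covers as the current dimension's stride) instead of A's backward index loop with a running-product accumulator; Pre_ excludes only the inputs where A raises (length mismatch assert, permutation entry outside [-dim, dim) -> IndexError).
import Mathlib
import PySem

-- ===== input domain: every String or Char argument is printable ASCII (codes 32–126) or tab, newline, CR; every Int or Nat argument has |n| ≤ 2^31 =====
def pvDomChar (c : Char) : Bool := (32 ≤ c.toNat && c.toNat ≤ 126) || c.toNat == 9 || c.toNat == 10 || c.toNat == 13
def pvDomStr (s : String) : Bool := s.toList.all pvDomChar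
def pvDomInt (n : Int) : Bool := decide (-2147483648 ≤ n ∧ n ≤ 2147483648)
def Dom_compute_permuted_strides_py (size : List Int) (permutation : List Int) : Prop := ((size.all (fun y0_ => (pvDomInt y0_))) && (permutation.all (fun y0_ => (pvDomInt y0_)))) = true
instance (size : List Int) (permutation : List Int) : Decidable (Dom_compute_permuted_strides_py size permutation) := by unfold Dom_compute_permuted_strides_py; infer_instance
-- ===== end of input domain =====

-- B computes strides by structural recursion on the permutation list (tail first,
-- returning the tail's element count as the current stride) instead of A's
-- backward index loop with a running product (objective: alternative, same cost).

-- ===== PORT A =====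
def compute_permuted_strides_py (size : List Int) (permutation : List Int) : List Int :=
  let dim : Int := (size.length : Int)
  let stride : List Int := List.replicate size.length (0 : Int)
  let st := (PySem.List.pyRange (dim - 1) (-1) (-1)).foldl
    (fun (st : List Int × Int) idx =>
      let d := PySem.List.pyGetD permutation idx 0
      let s0 := PySem.List.pyGetD size d 0
      let s := if s0 = 0 then 1 else s0
      (PySem.List.pySetD st.1 d st.2, st.2 * s))
    (stride, 1)
  st.1

-- ===== PORT B =====
-- fill: recurse on the remaining iteration order carrying the stride list
-- (Python mutates the enclosing `stride`); returns (stride list, element count).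
def pvFillB (size : List Int) : List Int → List Int → List Int × Int
  | [], stride => (stride, 1)
  | d :: rest, stride =>
      let r := pvFillB size rest stride
      let inner := r.2
      let stride' := PySem.List.pySetD r.1 d inner
      let s := PySem.List.pyGetD size d 0
      (stride', inner * (if s ≠ 0 then s else 1))

def compute_permuted_strides_py_alt (size : List Int) (permutation : List Int) : List Int :=
  let stride : List Int := List.replicate size.length (0 : Int)
  (pvFillB size permutation stride).1

-- ===== PRECONDITION & SPEC =====
-- Pre_ excludes exactly the inputs where the Python A raises: the assert
-- (length mismatch) and IndexError (a permutation entry outside [-dim, dim)).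
def Pre_compute_permuted_strides_py (size : List Int) (permutation : List Int) : Prop :=
  permutation.length = size.length ∧
  ∀ d ∈ permutation, -(size.length : Int) ≤ d ∧ d < (size.length : Int)
instance (size : List Int) (permutation : List Int) : Decidable (Pre_compute_permuted_strides_py size permutation) := by unfold Pre_compute_permuted_strides_py; infer_instance
def pvWitness_compute_permuted_strides_py : List Int × List Int := ([2, 3, 4], [0, 1, 2])
def Spec_compute_permuted_strides_py (size : List Int) (permutation : List Int) (out : List Int) : Prop := out = compute_permuted_strides_py_alt size permutation
instance (size : List Int) (permutation : List Int) (out : List Int) : Decidable (Spec_compute_permuted_strides_py size permutation out) := by unfold Spec_compute_permuted_strides_py; infer_instance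

-- ===== CLAIM (what is proved, stated in full; the proofs are below) =====
def Claim_equal_compute_permuted_strides_py : Prop := ∀ (size : List Int) (permutation : List Int), Dom_compute_permuted_strides_py size permutation → Pre_compute_permuted_strides_py size permutation → Spec_compute_permuted_strides_py size permutation (compute_permuted_strides_py size permutation)

-- ===== LEMMAS AND PROOFS =====

-- the common step both programs apply for a dimension index d
def pvStep (size : List Int) (d : Int) (st : List Int × Int) : List Int × Int :=
  (PySem.List.pySetD st.1 d st.2,
   st.2 * (if PySem.List.pyGetD size d 0 = 0 then 1 else PySem.List.pyGetD size d 0))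

theorem pvFillB_eq_foldr (size : List Int) (perm stride : List Int) :
    pvFillB size perm stride = perm.foldr (pvStep size) (stride, 1) := by
  induction perm with
  | nil => rfl
  | cons d rest ih =>
    simp only [pvFillB, ih, List.foldr_cons, pvStep]
    by_cases h : PySem.List.pyGetD size d 0 = 0 <;> simp [h]

theorem foldr_range_getD (size : List Int) (l : List Int) (init : List Int × Int) :
    (List.range l.length).foldr (fun i st => pvStep size (l.getD i 0) st) init
      = l.foldr (pvStep size) init := by
  induction l with
  | nil => rfl
  | cons x xs ih =>
    rw [List.length_cons, List.range_succ_eq_map, List.foldr_cons, List.foldr_map]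
    simp only [List.getD_cons_succ, List.getD_cons_zero]
    rw [ih]
    rfl

-- ===== VERDICT (by name: the statement is the Claim_ definition above) =====
theorem compute_permuted_strides_py_spec : Claim_equal_compute_permuted_strides_py := by
  intro size permutation _hdom hpre
  obtain ⟨hlen, _hin⟩ := hpre
  unfold Spec_compute_permuted_strides_py
  unfold compute_permuted_strides_py compute_permuted_strides_py_alt
  simp only []
  rw [pvFillB_eq_foldr]
  congr 1
  have hr : PySem.List.pyRange ((size.length : Int) - 1) (-1) (-1)
      = (PySem.List.pyRange (0 : Int) ((size.length : Int)) 1).reverse := by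
    rw [PySem.List.pyRange_neg_one_eq_reverse]; norm_num
  rw [hr, List.foldl_reverse, PySem.List.pyRange_zero_natCast, List.foldr_map]
  have hbody : (fun (i : Nat) (st : List Int × Int) =>
      let d := PySem.List.pyGetD permutation ((i : Nat) : Int) 0
      let s0 := PySem.List.pyGetD size d 0
      let s := if s0 = 0 then 1 else s0
      (PySem.List.pySetD st.1 d st.2, st.2 * s))
      = (fun (i : Nat) (st : List Int × Int) => pvStep size (permutation.getD i 0) st) := by
    funext i st
    simp [pvStep, PySem.List.pyGetD_natCast]
  rw [hbody, ← hlen, foldr_range_getD]
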